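-- pv_equiv track=rewrite | github.com/Dooms77/alphalyceum | python/content_automation.py | build_short_script
-- ===== SOURCE A (Python) =====
-- def build_short_script(rows):
--     btc = [r for r in rows if str(r.get("symbol")) == "BTCUSD.vx"]
--     xau = [r for r in rows if str(r.get("symbol")) == "XAUUSD.vx"]
--     b = btc[-1] if btc else {}
--     x = xau[-1] if xau else {}
--
--     return (
--         "HOOK: Hari ini market ngasih sinyal jelas atau malah jebakan?\n\n"
--         f"BTC sekarang status {b.get('status','-')} dengan score {b.get('quality_score','-')}. "
--         f"Alasan utamanya: {b.get('reason','-')}.\n"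
--         f"Gold/XAU status {x.get('status','-')} dengan score {x.get('quality_score','-')}. "
--         f"Catatan penting: {x.get('reason','-')}.\n\n"
--         "INTI: kita cuma ambil setup yang lolos quality gate, bukan nebak arah.\n"
--         "CTA: Mau lanjut aku bikin breakdown entry plan per pair?"
--     )
-- ===== SOURCE B (Python) =====
-- def build_short_script(rows):
--     # One pass over rows keeping the last-seen row per symbol (instead of two
--     # filtering comprehensions indexed with [-1]).
--     b = {}
--     x = {}
--     for r in rows:
--         s = str(r.get("symbol"))
--         if s == "BTCUSD.vx":
--             b = r
--         elif s == "XAUUSD.vx":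
--             x = r
--     return (
--         "HOOK: Hari ini market ngasih sinyal jelas atau malah jebakan?\n\n"
--         f"BTC sekarang status {b.get('status','-')} dengan score {b.get('quality_score','-')}. "
--         f"Alasan utamanya: {b.get('reason','-')}.\n"
--         f"Gold/XAU status {x.get('status','-')} dengan score {x.get('quality_score','-')}. "
--         f"Catatan penting: {x.get('reason','-')}.\n\n"
--         "INTI: kita cuma ambil setup yang lolos quality gate, bukan nebak arah.\n"
--         "CTA: Mau lanjut aku bikin breakdown entry plan per pair?"
--     )
-- ===== Notes on version B (the rewrite author's own statement) =====
-- stated objective: simpler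
-- what changed: Replaces the two filtering list comprehensions plus [-1] indexing with a single pass over rows that keeps the last-seen BTC and XAU rows in two running variables.
import Mathlib
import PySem

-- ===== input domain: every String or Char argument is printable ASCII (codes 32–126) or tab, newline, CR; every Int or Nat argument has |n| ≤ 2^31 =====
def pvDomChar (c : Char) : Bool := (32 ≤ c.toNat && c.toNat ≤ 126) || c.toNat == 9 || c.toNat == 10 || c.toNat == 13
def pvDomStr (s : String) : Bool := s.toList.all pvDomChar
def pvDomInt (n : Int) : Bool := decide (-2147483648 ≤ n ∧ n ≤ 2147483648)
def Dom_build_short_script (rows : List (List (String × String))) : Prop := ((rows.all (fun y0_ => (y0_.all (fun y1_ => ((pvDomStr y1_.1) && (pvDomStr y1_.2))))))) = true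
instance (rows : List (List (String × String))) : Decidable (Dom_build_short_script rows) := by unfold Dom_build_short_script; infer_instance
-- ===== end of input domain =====

-- ===== PORT A =====
-- B replaces A's two filtering comprehensions + [-1] with one last-seen pass; same return value.
-- str(r.get("symbol")): None renders as "None", a string renders as itself (values here are str).
def pvSym (r : List (String × String)) : String :=
  match (PySem.Dict.mk r).get? "symbol" with
  | some s => s
  | none => "None"

-- the shared trailing f-string of both Pythons, rendered from rows b and x
def pvRender (b x : List (String × String)) : String :=
  "HOOK: Hari ini market ngasih sinyal jelas atau malah jebakan?\n\n" ++
  "BTC sekarang status " ++ (PySem.Dict.mk b).getD "status" "-" ++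
  " dengan score " ++ (PySem.Dict.mk b).getD "quality_score" "-" ++ ". " ++
  "Alasan utamanya: " ++ (PySem.Dict.mk b).getD "reason" "-" ++ ".\n" ++
  "Gold/XAU status " ++ (PySem.Dict.mk x).getD "status" "-" ++
  " dengan score " ++ (PySem.Dict.mk x).getD "quality_score" "-" ++ ". " ++
  "Catatan penting: " ++ (PySem.Dict.mk x).getD "reason" "-" ++ ".\n\n" ++
  "INTI: kita cuma ambil setup yang lolos quality gate, bukan nebak arah.\n" ++
  "CTA: Mau lanjut aku bikin breakdown entry plan per pair?"

def build_short_script (rows : List (List (String × String))) : String :=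
  let btc := rows.filter (fun r => pvSym r == "BTCUSD.vx")
  let xau := rows.filter (fun r => pvSym r == "XAUUSD.vx")
  -- btc[-1] if btc else {} : the guard makes pyGet? always some; getD's default is unreachable
  let b := if btc.isEmpty then [] else (PySem.List.pyGet? btc (-1)).getD []
  let x := if xau.isEmpty then [] else (PySem.List.pyGet? xau (-1)).getD []
  pvRender b x

-- ===== PORT B =====
def build_short_script_alt (rows : List (List (String × String))) : String :=
  let bx := rows.foldl (fun bx r =>
    let s := pvSym r
    if s == "BTCUSD.vx" then (r, bx.2)
    else if s == "XAUUSD.vx" then (bx.1, r)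
    else bx) (([] : List (String × String)), ([] : List (String × String)))
  pvRender bx.1 bx.2

-- ===== PRECONDITION & SPEC =====
def Spec_build_short_script (rows : List (List (String × String))) (out : String) : Prop := out = build_short_script_alt rows
instance (rows : List (List (String × String))) (out : String) : Decidable (Spec_build_short_script rows out) := by unfold Spec_build_short_script; infer_instance

-- ===== CLAIM (what is proved, stated in full; the proofs are below) =====
def Claim_equal_build_short_script : Prop := ∀ (rows : List (List (String × String))), Dom_build_short_script rows → Spec_build_short_script rows (build_short_script rows)

-- ===== LEMMAS AND PROOFS =====
theorem pv_lastD_cons {α : Type} (a : α) (l : List α) (d : α) :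
    ((a :: l).getLast?).getD d = (l.getLast?).getD a := by
  cases l with
  | nil => rfl
  | cons a' t =>
    obtain ⟨y, hy⟩ := Option.isSome_iff_exists.mp (by simp [List.getLast?_isSome] : (a' :: t).getLast?.isSome)
    simp [List.getLast?_cons_cons, hy]

-- one-pass fold = (last BTC match, last XAU match), with running defaults
theorem pv_fold_eq (rows : List (List (String × String)))
    (b0 x0 : List (String × String)) :
    rows.foldl (fun bx r =>
      let s := pvSym r
      if s == "BTCUSD.vx" then (r, bx.2)
      else if s == "XAUUSD.vx" then (bx.1, r)
      else bx) (b0, x0)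
    = (((rows.filter (fun r => pvSym r == "BTCUSD.vx")).getLast?).getD b0,
       ((rows.filter (fun r => pvSym r == "XAUUSD.vx")).getLast?).getD x0) := by
  induction rows generalizing b0 x0 with
  | nil => rfl
  | cons r t ih =>
    by_cases hb : pvSym r == "BTCUSD.vx"
    · have hx : (pvSym r == "XAUUSD.vx") = false := by
        revert hb; cases h : pvSym r == "BTCUSD.vx" <;> simp_all
      simp only [List.foldl_cons, List.filter_cons, hb, hx, if_true]
      rw [ih, pv_lastD_cons]
      simp
    · by_cases hx : pvSym r == "XAUUSD.vx"
      · simp only [List.foldl_cons, List.filter_cons, hx]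
        simp only [Bool.not_eq_true] at hb
        simp only [hb, if_true]
        rw [ih, pv_lastD_cons]
        simp
      · simp only [Bool.not_eq_true] at hb hx
        simp only [List.foldl_cons, List.filter_cons, hb, hx]
        exact ih b0 x0

theorem pv_last_eq (l : List (List (String × String))) :
    (if l.isEmpty then ([] : List (String × String)) else (PySem.List.pyGet? l (-1)).getD [])
    = (l.getLast?).getD [] := by
  cases l with
  | nil => rfl
  | cons a t => simp [PySem.List.pyGet?_neg_one]

-- ===== VERDICT (by name: the statement is the Claim_ definition above) =====
theorem build_short_script_spec : Claim_equal_build_short_script := by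
  intro rows _
  show build_short_script rows = build_short_script_alt rows
  unfold build_short_script build_short_script_alt
  simp only [pv_fold_eq, pv_last_eq]
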